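-- pv_equiv track=rewrite | github.com/core-choi/NT-LEADTIME | build.py | find_trend_year
-- ===== SOURCE A (Python) =====
-- def find_trend_year(all_months, current):
--     """Find 12 months of data for trend (previous year of current)"""
--     if not current:
--         return None
--     target_year = current[0] - 1
--     trend_months = [m for m in all_months if m[0] == target_year]
--     if trend_months:
--         return target_year
--     # Also check current year (for partial year trend)
--     curr_months = [m for m in all_months if m[0] == current[0]]
--     if len(curr_months) >= 2:
--         return current[0]
--     return None
-- ===== SOURCE B (Python) =====
-- def find_trend_year(all_months, current):
--     """Find 12 months of data for trend (previous year of current)"""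
--     if not current:
--         return None
--     prev = current[0] - 1
--     curr_count = 0
--     for m in all_months:
--         y = m[0]
--         if y == prev:
--             return prev
--         if y == current[0]:
--             curr_count += 1
--     return current[0] if curr_count >= 2 else None
-- ===== Notes on version B (the rewrite author's own statement) =====
-- stated objective: alternative
-- what changed: B replaces A's two staged filtering passes by a single pass with an accumulator: it returns the previous year immediately at the first record of that year (early exit), while counting current-year records on the way; only if no previous-year record exists does it fall back to the count.
import Mathlib
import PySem

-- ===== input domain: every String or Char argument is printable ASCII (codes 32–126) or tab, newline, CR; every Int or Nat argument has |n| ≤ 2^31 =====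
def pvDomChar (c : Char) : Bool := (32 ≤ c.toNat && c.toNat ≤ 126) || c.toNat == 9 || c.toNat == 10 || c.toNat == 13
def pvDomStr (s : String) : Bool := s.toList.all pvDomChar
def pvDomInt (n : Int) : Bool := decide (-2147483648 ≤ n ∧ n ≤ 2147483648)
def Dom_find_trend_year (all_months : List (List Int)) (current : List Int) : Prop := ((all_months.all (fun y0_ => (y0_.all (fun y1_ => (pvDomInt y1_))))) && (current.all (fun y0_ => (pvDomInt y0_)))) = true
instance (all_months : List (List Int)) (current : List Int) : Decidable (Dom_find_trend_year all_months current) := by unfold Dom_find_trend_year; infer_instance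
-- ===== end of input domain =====

-- B replaces A's two staged filtering passes by one early-exiting pass with a running
-- current-year count (objective: alternative decomposition, same asymptotic cost).
-- ===== PORT A =====
def find_trend_year (all_months : List (List Int)) (current : List Int) : Option Int :=
  match current with
  | [] => none
  | c0 :: _ =>
    let target_year := c0 - 1
    let trend_months := all_months.filter (fun m => PySem.List.pyGetD m 0 0 == target_year)
    if trend_months ≠ [] then some target_year
    else
      let curr_months := all_months.filter (fun m => PySem.List.pyGetD m 0 0 == c0)
      if curr_months.length ≥ 2 then some c0 else none

-- ===== PORT B =====
-- B's for-loop with early return, as structural recursion over the remaining records.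
def findTrendLoop (prev c0 : Int) : List (List Int) → Int → Option Int
  | [], curr_count => if curr_count ≥ 2 then some c0 else none
  | m :: ms, curr_count =>
    let y := PySem.List.pyGetD m 0 0
    if y == prev then some prev
    else findTrendLoop prev c0 ms (curr_count + (if y == c0 then 1 else 0))

def find_trend_year_alt (all_months : List (List Int)) (current : List Int) : Option Int :=
  match current with
  | [] => none
  | c0 :: _ => findTrendLoop (c0 - 1) c0 all_months 0

-- ===== PRECONDITION & SPEC =====
-- Pre_ excludes inputs on which Python A raises IndexError: an empty month record in all_months
-- while current is nonempty (with current = [] A returns None before indexing).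
def Pre_find_trend_year (all_months : List (List Int)) (current : List Int) : Prop :=
  current = [] ∨ ∀ m ∈ all_months, m ≠ []
instance (all_months : List (List Int)) (current : List Int) : Decidable (Pre_find_trend_year all_months current) := by unfold Pre_find_trend_year; infer_instance

def pvWitness_find_trend_year : List (List Int) × List Int := ([[2023, 1], [2023, 2]], [2024, 5])

def Spec_find_trend_year (all_months : List (List Int)) (current : List Int) (out : Option Int) : Prop := out = find_trend_year_alt all_months current
instance (all_months : List (List Int)) (current : List Int) (out : Option Int) : Decidable (Spec_find_trend_year all_months current out) := by unfold Spec_find_trend_year; infer_instance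

-- ===== CLAIM (what is proved, stated in full; the proofs are below) =====
def Claim_equal_find_trend_year : Prop := ∀ (all_months : List (List Int)) (current : List Int), Dom_find_trend_year all_months current → Pre_find_trend_year all_months current → Spec_find_trend_year all_months current (find_trend_year all_months current)

-- ===== LEMMAS AND PROOFS =====

-- The single early-exit pass computes exactly A's staged answer.
theorem findTrendLoop_spec (prev c0 : Int) (l : List (List Int)) (cnt : Int) :
    findTrendLoop prev c0 l cnt =
      if (l.filter (fun m => PySem.List.pyGetD m 0 0 == prev)) ≠ [] then some prev
      else if cnt + ((l.filter (fun m => PySem.List.pyGetD m 0 0 == c0)).length : Int) ≥ 2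
        then some c0 else none := by
  induction l generalizing cnt with
  | nil => simp [findTrendLoop]
  | cons m ms ih =>
    by_cases hp : PySem.List.pyGetD m 0 0 = prev
    · simp [findTrendLoop, hp]
    · by_cases hc : PySem.List.pyGetD m 0 0 = c0
      · simp only [findTrendLoop, ih]
        rw [hc] at hp
        simp [hc, hp]
        exact if_congr Iff.rfl rfl (if_congr (by omega) rfl rfl)
      · simp only [findTrendLoop, ih]
        simp [hp, hc]

-- ===== VERDICT (by name: the statement is the Claim_ definition above) =====
theorem find_trend_year_spec : Claim_equal_find_trend_year := by
  intro all_months current _ _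
  unfold Spec_find_trend_year find_trend_year find_trend_year_alt
  cases current with
  | nil => rfl
  | cons c0 rest =>
    dsimp only
    rw [findTrendLoop_spec]
    simp only [ne_eq, zero_add]
    congr 1
    have h2 : ((List.filter (fun m => PySem.List.pyGetD m 0 0 == c0) all_months).length ≥ 2)
        ↔ (((List.filter (fun m => PySem.List.pyGetD m 0 0 == c0) all_months).length : Int) ≥ 2) := by
      omega
    exact if_congr h2 rfl rfl
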